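-- pv_equiv track=rewrite | github.com/Svessinn/Kattis | Iceland/100/iceland.egelskahann.py | check
-- ===== SOURCE A (Python) =====
-- def check(n):
--     if n == 1:
--         return 1
--     res = 0
--     if n % 2 == 0:
--         res = 2*check(n//2)-1
--     else:
--         res = 2*check(n//2)+1
--     return res
-- ===== SOURCE B (Python) =====
-- def check(n):
--     # iterative over the binary digits of n (MSB first), instead of recursion
--     res = 1
--     for b in bin(n)[3:]:
--         res = 2 * res + (1 if b == '1' else -1)
--     return res
-- ===== Notes on version B (the rewrite author's own statement) =====
-- stated objective: simpler
-- what changed: Replaces the recursion check(n)=2*check(n//2)+/-1 by a single iterative pass over n's binary digits (MSB first), accumulating res = 2*res +/- 1.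
import Mathlib
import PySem

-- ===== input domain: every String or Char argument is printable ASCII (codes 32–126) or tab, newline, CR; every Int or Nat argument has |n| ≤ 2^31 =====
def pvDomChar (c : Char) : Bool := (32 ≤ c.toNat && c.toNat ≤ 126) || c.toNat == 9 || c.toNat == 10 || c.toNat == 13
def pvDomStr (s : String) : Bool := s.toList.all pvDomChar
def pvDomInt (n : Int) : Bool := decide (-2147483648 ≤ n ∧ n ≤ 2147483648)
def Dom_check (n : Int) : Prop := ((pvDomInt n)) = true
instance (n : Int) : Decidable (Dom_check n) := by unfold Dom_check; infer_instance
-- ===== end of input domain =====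

-- B replaces A's recursion by one iterative pass over n's binary digits (simpler decomposition);
-- A raises RecursionError for n ≤ 0 (excluded by Pre_), where B returns a value.

-- ===== PORT A =====
-- literal port of A's recursion; the 'n ≤ 0' guard only makes the diverging region total (outside Pre_)
def check (n : Int) : Int :=
  if n = 1 then 1
  else if n ≤ 0 then 0
  else if PySem.Int.mod n 2 = 0 then 2 * check (PySem.Int.floordiv n 2) - 1
  else 2 * check (PySem.Int.floordiv n 2) + 1
termination_by n.toNat
decreasing_by
  all_goals
    rw [PySem.Int.floordiv_eq_ediv_of_pos (by omega)]
    omega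

-- ===== PORT B =====
-- bits of a nonnegative integer, most-significant first (= the digits of bin(n) for n > 0)
def binBits (m : Nat) : List Bool :=
  if h : m = 0 then []
  else binBits (m / 2) ++ [m % 2 == 1]
decreasing_by exact Nat.div_lt_self (Nat.pos_of_ne_zero h) (by omega)

-- fold over bin(n)[3:], i.e. the bits after the leading one, with res starting at 1
def check_alt (n : Int) : Int :=
  ((binBits n.toNat).drop 1).foldl (fun res b => 2 * res + (if b then 1 else -1)) 1

-- ===== PRECONDITION & SPEC =====
-- A recurses forever (RecursionError) for every n ≤ 0, so Pre_ admits exactly n ≥ 1.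
def Pre_check (n : Int) : Prop := 1 ≤ n
instance (n : Int) : Decidable (Pre_check n) := by unfold Pre_check; infer_instance
def pvWitness_check : Int := 6

def Spec_check (n : Int) (out : Int) : Prop := out = check_alt n
instance (n : Int) (out : Int) : Decidable (Spec_check n out) := by unfold Spec_check; infer_instance

-- ===== CLAIM (what is proved, stated in full; the proofs are below) =====
def Claim_equal_check : Prop := ∀ (n : Int), Dom_check n → Pre_check n → Spec_check n (check n)

-- ===== LEMMAS AND PROOFS =====

lemma binBits_ne_nil {m : Nat} (h : m ≠ 0) : binBits m ≠ [] := by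
  rw [binBits]
  simp [h]

lemma foldl_step_append (l : List Bool) (b : Bool) (r : Int) :
    (l ++ [b]).foldl (fun res b => 2 * res + (if b then 1 else -1)) r
      = 2 * (l.foldl (fun res b => 2 * res + (if b then 1 else -1)) r) + (if b then 1 else -1) := by
  simp [List.foldl_append]

lemma drop_one_append_singleton {l : List Bool} (h : l ≠ []) (b : Bool) :
    (l ++ [b]).drop 1 = l.drop 1 ++ [b] := by
  cases l with
  | nil => exact absurd rfl h
  | cons x xs => simp

lemma binBits_zero : binBits 0 = [] := by rw [binBits]; simp

lemma binBits_one : binBits 1 = [true] := by rw [binBits]; simp [binBits_zero]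

lemma check_alt_one : check_alt 1 = 1 := by simp [check_alt, binBits_one]

lemma check_alt_nat (m : Nat) (h : 2 ≤ m) :
    check_alt (m : Int) = 2 * check_alt ((m / 2 : Nat) : Int) + (if m % 2 = 1 then 1 else -1) := by
  have hd : m / 2 ≠ 0 := by omega
  simp only [check_alt, Int.toNat_natCast]
  conv_lhs => rw [binBits]
  rw [dif_neg (by omega), drop_one_append_singleton (binBits_ne_nil hd),
      foldl_step_append]
  by_cases hc : m % 2 = 1 <;> simp [hc]

lemma check_eq_alt_nat (m : Nat) (h : 1 ≤ m) : check (m : Int) = check_alt (m : Int) := by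
  induction m using Nat.strong_induction_on with
  | _ m ih =>
    by_cases h1 : m = 1
    · subst h1; rw [check]; simp [check_alt_one]
    · have h2 : 2 ≤ m := by omega
      rw [check, check_alt_nat m h2]
      have hfd : PySem.Int.floordiv (m : Int) 2 = ((m / 2 : Nat) : Int) := by
        exact_mod_cast PySem.Int.floordiv_natCast m 2
      have hmd : PySem.Int.mod (m : Int) 2 = ((m % 2 : Nat) : Int) := by
        exact_mod_cast PySem.Int.mod_natCast m 2
      have hrec := ih (m / 2) (by omega) (by omega)
      rw [if_neg (by exact_mod_cast h1), if_neg (by omega), hfd, hmd, hrec]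
      have hcase : m % 2 = 0 ∨ m % 2 = 1 := by omega
      rcases hcase with hc | hc <;> simp [hc] <;> omega

-- ===== VERDICT (by name: the statement is the Claim_ definition above) =====
theorem check_spec : Claim_equal_check := by
  intro n _ hpre
  unfold Pre_check at hpre
  have hn : n = ((n.toNat : Nat) : Int) := by omega
  unfold Spec_check
  rw [hn]
  exact check_eq_alt_nat n.toNat (by omega)
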